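-- pv_equiv track=rewrite | github.com/Akvarion/simod_docker | ros2_ws/src/ps_try/scripts/bt_xml_demo/mixins/gazebo_bridge.py | _pick_model_index
-- ===== SOURCE A (Python) =====
-- from typing import List, Optional
--
-- def _pick_model_index(model_names: List[str], raw_candidates: List[str]) -> Optional[int]:
--     if not model_names:
--         return None
--     candidates = [str(c).lower() for c in (raw_candidates or []) if str(c).strip()]
--     if not candidates:
--         return None
--     lowered = [str(n).lower() for n in model_names]
--
--     # 1) match esatto
--     for cand in candidates:
--         for i, name in enumerate(lowered):
--             if name == cand:
--                 return i
--
--     # 2) match prefisso/suffisso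
--     for cand in candidates:
--         for i, name in enumerate(lowered):
--             if name.startswith(cand) or name.endswith(cand):
--                 return i
--
--     # 3) contains
--     for cand in candidates:
--         for i, name in enumerate(lowered):
--             if cand in name:
--                 return i
--
--     return None
-- ===== SOURCE B (Python) =====
-- from typing import List, Optional
--
-- def _tier(name: str, cand: str) -> Optional[int]:
--     if name == cand:
--         return 1
--     if name.startswith(cand) or name.endswith(cand):
--         return 2
--     if cand in name:
--         return 3
--     return None
--
-- def _pick_model_index(model_names: List[str], raw_candidates: List[str]) -> Optional[int]:
--     candidates = [c.lower() for c in (raw_candidates or []) if c.strip()]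
--     if not model_names or not candidates:
--         return None
--     lowered = [n.lower() for n in model_names]
--     best = None  # lexicographically least (tier, cand_index, name_index) seen so far
--     for ci, cand in enumerate(candidates):
--         for i, name in enumerate(lowered):
--             t = _tier(name, cand)
--             if t is None:
--                 continue
--             key = (t, ci, i)
--             if best is None or key < best:
--                 best = key
--         if best is not None and best[0] == 1:
--             # exact match found: every later key is lexicographically greater, stop
--             break
--     return best[2] if best is not None else None
-- ===== Notes on version B (the rewrite author's own statement) =====
-- stated objective: alternative
-- what changed: A's three sequential early-return scans (exact, then prefix/suffix, then contains) over candidates x names are replaced by a single nested pass that classifies each pair into a tier once and keeps the lexicographically least (tier, cand_index, name_index) key.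
import Mathlib
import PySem

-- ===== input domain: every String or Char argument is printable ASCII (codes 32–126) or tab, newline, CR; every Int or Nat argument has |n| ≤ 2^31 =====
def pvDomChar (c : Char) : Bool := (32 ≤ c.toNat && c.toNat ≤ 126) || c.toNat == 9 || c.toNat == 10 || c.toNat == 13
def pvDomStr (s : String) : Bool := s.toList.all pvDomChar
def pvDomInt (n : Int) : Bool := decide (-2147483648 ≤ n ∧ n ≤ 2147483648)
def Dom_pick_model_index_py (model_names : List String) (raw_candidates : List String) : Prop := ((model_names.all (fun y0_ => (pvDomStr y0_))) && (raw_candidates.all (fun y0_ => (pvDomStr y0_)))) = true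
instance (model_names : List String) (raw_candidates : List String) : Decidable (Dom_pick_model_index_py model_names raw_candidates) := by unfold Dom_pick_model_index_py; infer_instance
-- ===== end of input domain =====

-- B replaces A's three sequential early-return candidate×name scans by one nested pass
-- that classifies each pair into a match tier and keeps the lexicographically least
-- (tier, cand_index, name_index) key (objective: alternative; same asymptotic cost).


-- ===== PORT A =====
-- inner loop of each pass: for i, name in enumerate(lowered): if pred(name, cand): return i
def pvInnerA (pred : String → String → Bool) (cand : String) : List (Int × String) → Option Int
  | [] => none
  | (i, name) :: rest => if pred name cand then some i else pvInnerA pred cand rest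

-- outer loop of each pass: for cand in candidates: …
def pvOuterA (pred : String → String → Bool) : List String → List (Int × String) → Option Int
  | [], _ => none
  | cand :: cs, en =>
    match pvInnerA pred cand en with
    | some i => some i
    | none => pvOuterA pred cs en

def pick_model_index_py (model_names : List String) (raw_candidates : List String) : Option Int :=
  if model_names.isEmpty then none else
  let candidates := (raw_candidates.filter (fun c => !(PySem.Str.strip c == ""))).map PySem.Str.lower
  if candidates.isEmpty then none else
  let lowered := model_names.map PySem.Str.lower
  let en := PySem.List.enumerate lowered 0
  match pvOuterA (fun name cand => name == cand) candidates en with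
  | some i => some i
  | none =>
    match pvOuterA (fun name cand => PySem.Str.startswith name cand || PySem.Str.endswith name cand) candidates en with
    | some i => some i
    | none =>
      match pvOuterA (fun name cand => PySem.Str.isIn cand name) candidates en with
      | some i => some i
      | none => none

-- ===== PORT B =====
-- the tier of a (name, cand) pair: 1 exact, 2 prefix/suffix, 3 contains, none no match
def pvTier (name cand : String) : Option Int :=
  if name == cand then some 1
  else if PySem.Str.startswith name cand || PySem.Str.endswith name cand then some 2
  else if PySem.Str.isIn cand name then some 3
  else none

-- Python tuple '<' on the (tier, cand_index, name_index) key: strict lexicographic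
def pvKeyLt (a b : Int × Int × Int) : Bool :=
  a.1 < b.1 || (a.1 == b.1 && (a.2.1 < b.2.1 || (a.2.1 == b.2.1 && a.2.2 < b.2.2)))

-- one candidate's inner loop: for i, name in enumerate(lowered): classify, keep the least key
def pvInnerB (lowered : List (Int × String)) (p : Int × String) (best : Option (Int × Int × Int)) : Option (Int × Int × Int) :=
  lowered.foldl (fun best q =>
    match pvTier q.2 p.2 with
    | none => best
    | some t =>
      let key := (t, p.1, q.1)
      match best with
      | none => some key
      | some b => if pvKeyLt key b then some key else some b) best

-- outer loop with Python's 'break' once the best key has tier 1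
def pvOuterB (lowered : List (Int × String)) : List (Int × String) → Option (Int × Int × Int) → Option (Int × Int × Int)
  | [], best => best
  | p :: rest, best =>
    match pvInnerB lowered p best with
    | some b => if b.1 == 1 then some b else pvOuterB lowered rest (some b)
    | none => pvOuterB lowered rest none

def pick_model_index_py_alt (model_names : List String) (raw_candidates : List String) : Option Int :=
  let candidates := (raw_candidates.filter (fun c => !(PySem.Str.strip c == ""))).map PySem.Str.lower
  if model_names.isEmpty || candidates.isEmpty then none else
  let lowered := model_names.map PySem.Str.lower
  let best := pvOuterB (PySem.List.enumerate lowered 0) (PySem.List.enumerate candidates 0) none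
  best.map (fun b => b.2.2)

-- ===== PRECONDITION & SPEC =====
def Spec_pick_model_index_py (model_names : List String) (raw_candidates : List String) (out : Option Int) : Prop := out = pick_model_index_py_alt model_names raw_candidates
instance (model_names : List String) (raw_candidates : List String) (out : Option Int) : Decidable (Spec_pick_model_index_py model_names raw_candidates out) := by unfold Spec_pick_model_index_py; infer_instance

-- ===== CLAIM (what is proved, stated in full; the proofs are below) =====
def Claim_equal_pick_model_index_py : Prop := ∀ (model_names : List String) (raw_candidates : List String), Dom_pick_model_index_py model_names raw_candidates → Spec_pick_model_index_py model_names raw_candidates (pick_model_index_py model_names raw_candidates)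

-- ===== LEMMAS AND PROOFS =====

-- the update step B applies per classified pair
def pvUpd (best : Option (Int × Int × Int)) (k : Int × Int × Int) : Option (Int × Int × Int) :=
  match best with
  | none => some k
  | some b => if pvKeyLt k b then some k else some b

-- all (tier, cand_index, name_index) triples, in B's traversal order
def pvTrip (cands : List String) (lowered : List String) : List (Int × Int × Int) :=
  (PySem.List.enumerate cands 0).flatMap (fun p =>
    (PySem.List.enumerate lowered 0).filterMap (fun q =>
      (pvTier q.2 p.2).map (fun t => (t, p.1, q.1))))

theorem pvKeyLt_iff (a b : Int × Int × Int) : pvKeyLt a b = true ↔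
    (a.1 < b.1 ∨ (a.1 = b.1 ∧ (a.2.1 < b.2.1 ∨ (a.2.1 = b.2.1 ∧ a.2.2 < b.2.2)))) := by
  simp [pvKeyLt]

theorem pvTier_range {name cand : String} {t : Int} (h : pvTier name cand = some t) :
    t = 1 ∨ t = 2 ∨ t = 3 := by
  unfold pvTier at h
  split_ifs at h <;> simp_all

theorem pvFoldl_fm (p : Int × String → Option (Int × Int × Int)) : ∀ (l : List (Int × String)) (b : Option (Int × Int × Int)),
    (l.filterMap p).foldl pvUpd b = l.foldl (fun b q => match p q with | none => b | some k => pvUpd b k) b := by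
  intro l
  induction l with
  | nil => intro b; rfl
  | cons q l ih => intro b; cases h : p q <;> simp [h, ih]

-- B's break-free nested fold is the fold of pvUpd over pvTrip
theorem pvB_fold_eq (cands lowered : List String) :
    ((PySem.List.enumerate cands 0).foldl (fun best p => pvInnerB (PySem.List.enumerate lowered 0) p best) none)
    = (pvTrip cands lowered).foldl pvUpd none := by
  unfold pvTrip pvInnerB
  rw [List.foldl_flatMap]
  congr 1
  funext best p
  rw [pvFoldl_fm]
  congr 1
  funext b q
  cases h : pvTier q.2 p.2 <;> simp [pvUpd]

-- once the best key has tier 1 and precedes every remaining candidate, the inner loop keeps it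
theorem pvInnerB_preserve (en : List (Int × String)) (p : Int × String) (b : Int × Int × Int)
    (hb1 : b.1 = 1) (hplt : b.2.1 < p.1) : pvInnerB en p (some b) = some b := by
  unfold pvInnerB
  induction en with
  | nil => rfl
  | cons q en ih =>
    simp only [List.foldl_cons]
    cases ht : pvTier q.2 p.2 with
    | none => exact ih
    | some t =>
      have hlt : pvKeyLt (t, p.1, q.1) b = false := by
        rw [Bool.eq_false_iff]; intro h
        rw [pvKeyLt_iff] at h
        have h' : t < b.1 ∨ (t = b.1 ∧ (p.1 < b.2.1 ∨ (p.1 = b.2.1 ∧ q.1 < b.2.2))) := by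
          simpa using h
        have := pvTier_range ht
        omega
      simp only [hlt, Bool.false_eq_true, if_false]
      exact ih

-- the inner loop either keeps its input or returns a key of the current candidate
theorem pvInnerB_eq_upd (en : List (Int × String)) (p : Int × String) (best : Option (Int × Int × Int)) :
    pvInnerB en p best = en.foldl (fun best q =>
      match pvTier q.2 p.2 with
      | none => best
      | some t => pvUpd best (t, p.1, q.1)) best := rfl

theorem pvInnerB_state (en : List (Int × String)) (p : Int × String) : ∀ best,
    pvInnerB en p best = best ∨
    ∃ t j, pvInnerB en p best = some (t, p.1, j) ∧ (t = 1 ∨ t = 2 ∨ t = 3) := by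
  simp only [pvInnerB_eq_upd]
  induction en with
  | nil => intro best; exact Or.inl rfl
  | cons q en ih =>
    intro best
    simp only [List.foldl_cons]
    cases ht : pvTier q.2 p.2 with
    | none => exact ih best
    | some t =>
      dsimp only
      have htr := pvTier_range ht
      have hstep : pvUpd best (t, p.1, q.1) = best ∨ pvUpd best (t, p.1, q.1) = some (t, p.1, q.1) := by
        cases best with
        | none => exact Or.inr rfl
        | some b =>
          by_cases hkb : pvKeyLt (t, p.1, q.1) b = true <;> simp [pvUpd, hkb]
      rcases ih (pvUpd best (t, p.1, q.1)) with h | ⟨t', j, h, htr'⟩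
      · rcases hstep with he | he
        · exact Or.inl (h.trans he)
        · exact Or.inr ⟨t, q.1, h.trans he, htr⟩
      · exact Or.inr ⟨t', j, h, htr'⟩

-- the break-free outer fold also keeps a tier-1 best that precedes every remaining candidate
theorem pvFoldl_preserve (en : List (Int × String)) : ∀ (cs : List (Int × String)) (b : Int × Int × Int),
    b.1 = 1 → (∀ p ∈ cs, b.2.1 < p.1) →
    cs.foldl (fun best p => pvInnerB en p best) (some b) = some b := by
  intro cs
  induction cs with
  | nil => intro b _ _; rfl
  | cons p cs ih =>
    intro b hb1 hlt
    simp only [List.foldl_cons]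
    rw [pvInnerB_preserve en p b hb1 (hlt p (by simp))]
    exact ih b hb1 (fun p' hp' => hlt p' (List.mem_cons_of_mem _ hp'))

-- the break changes nothing: pvOuterB equals the break-free fold
theorem pvOuterB_eq_foldl (en : List (Int × String)) : ∀ (cs : List (Int × String)) (best : Option (Int × Int × Int)),
    cs.Pairwise (fun p q => p.1 < q.1) →
    (∀ b, best = some b → ∀ p ∈ cs, b.2.1 < p.1) →
    pvOuterB en cs best = cs.foldl (fun best p => pvInnerB en p best) best := by
  intro cs
  induction cs with
  | nil => intro best _ _; rfl
  | cons p cs ih =>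
    intro best hpw hb
    rw [List.pairwise_cons] at hpw
    have hb' : ∀ b, pvInnerB en p best = some b → ∀ p' ∈ cs, b.2.1 < p'.1 := by
      intro b hbe p' hp'
      rcases pvInnerB_state en p best with h | ⟨t, j, h, _⟩
      · rw [h] at hbe
        exact hb b hbe p' (List.mem_cons_of_mem _ hp')
      · rw [h] at hbe; cases hbe
        exact hpw.1 p' hp'
    rw [pvOuterB, List.foldl_cons]
    cases hbe : pvInnerB en p best with
    | none => exact ih none hpw.2 (by intro b h; cases h)
    | some b =>
      show (if (b.1 == 1) = true then some b else pvOuterB en cs (some b))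
          = List.foldl (fun best p => pvInnerB en p best) (some b) cs
      by_cases h1 : b.1 = 1
      · rw [if_pos (by simpa using h1)]
        exact (pvFoldl_preserve en cs b h1 (hb' b hbe)).symm
      · rw [if_neg (by simpa using h1)]
        exact ih (some b) hpw.2 (by intro b' h; cases h; exact hb' b hbe)

theorem pvFoldl_upd_some (L : List (Int × Int × Int)) : ∀ b : Int × Int × Int,
    ∃ m, L.foldl pvUpd (some b) = some m ∧ m ∈ b :: L ∧ ∀ k ∈ b :: L, pvKeyLt k m = false := by
  induction L with
  | nil =>
    intro b
    refine ⟨b, rfl, by simp, ?_⟩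
    intro k hk
    simp at hk; subst hk
    rw [Bool.eq_false_iff]
    intro h; rw [pvKeyLt_iff] at h; omega
  | cons k0 L ih =>
    intro b
    obtain ⟨m, hm, hmem, hmin⟩ := ih (if pvKeyLt k0 b then k0 else b)
    have hb'f : pvKeyLt (if pvKeyLt k0 b then k0 else b) m = false := hmin _ (by simp)
    rw [Bool.eq_false_iff] at hb'f
    refine ⟨m, ?_, ?_, ?_⟩
    · show List.foldl pvUpd (pvUpd (some b) k0) L = some m
      rw [show pvUpd (some b) k0 = some (if pvKeyLt k0 b then k0 else b) from by
        simp only [pvUpd]; split <;> rfl]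
      exact hm
    · rcases List.mem_cons.mp hmem with h | h
      · split at h <;> simp [h]
      · simp [h]
    · intro k hk
      rw [Bool.eq_false_iff]
      intro hlt
      rw [pvKeyLt_iff] at hlt
      rcases List.mem_cons.mp hk with rfl | hk'
      · by_cases hkb : pvKeyLt k0 k = true
        · rw [if_pos hkb] at hb'f
          rw [pvKeyLt_iff] at hkb
          simp only [ne_eq, pvKeyLt_iff] at hb'f
          exact hb'f (by omega)
        · rw [if_neg hkb] at hb'f
          simp only [ne_eq, pvKeyLt_iff] at hb'f
          exact hb'f (by omega)
      rcases List.mem_cons.mp hk' with rfl | hk''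
      · by_cases hkb : pvKeyLt k b = true
        · rw [if_pos hkb] at hb'f
          simp only [ne_eq, pvKeyLt_iff] at hb'f
          exact hb'f (by omega)
        · rw [if_neg hkb] at hb'f
          simp only [pvKeyLt_iff] at hkb
          simp only [ne_eq, pvKeyLt_iff] at hb'f
          exact hb'f (by omega)
      · have hmk := hmin k (by simp [hk''])
        rw [Bool.eq_false_iff] at hmk
        simp only [ne_eq, pvKeyLt_iff] at hmk
        exact hmk (by omega)

theorem pvFoldl_upd_char (L : List (Int × Int × Int)) (m : Int × Int × Int)
    (h : L.foldl pvUpd none = some m) : m ∈ L ∧ ∀ k ∈ L, pvKeyLt k m = false := by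
  cases L with
  | nil => simp at h
  | cons b L =>
    obtain ⟨m', hm', hmem, hmin⟩ := pvFoldl_upd_some L b
    have h2 : List.foldl pvUpd (some b) L = some m := h
    rw [hm'] at h2
    cases h2
    exact ⟨hmem, hmin⟩

theorem pvInnerA_none_iff (pred : String → String → Bool) (cand : String) (en : List (Int × String)) :
    pvInnerA pred cand en = none ↔ ∀ q ∈ en, pred q.2 cand = false := by
  induction en with
  | nil => simp [pvInnerA]
  | cons q en ih =>
    obtain ⟨i, name⟩ := q
    by_cases h : pred name cand = true
    · simp [pvInnerA, h]
    · rw [Bool.not_eq_true] at h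
      simp [pvInnerA, h, ih]

theorem pvInnerA_some (pred : String → String → Bool) (cand : String) (en : List (Int × String))
    (hen : en.Pairwise (fun p q => p.1 < q.1)) (j : Int) (h : pvInnerA pred cand en = some j) :
    (∃ n0, (j, n0) ∈ en ∧ pred n0 cand = true) ∧ ∀ q ∈ en, pred q.2 cand = true → j ≤ q.1 := by
  induction en with
  | nil => simp [pvInnerA] at h
  | cons q en ih =>
    obtain ⟨i, name⟩ := q
    rw [List.pairwise_cons] at hen
    by_cases hp : pred name cand = true
    · rw [pvInnerA, if_pos hp] at h
      cases h
      refine ⟨⟨name, by simp, hp⟩, ?_⟩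
      intro q hq _
      rcases List.mem_cons.mp hq with rfl | hq'
      · exact le_rfl
      · exact le_of_lt (hen.1 q hq')
    · rw [pvInnerA, if_neg hp] at h
      obtain ⟨⟨n0, hn0, hpn0⟩, hmin⟩ := ih hen.2 h
      refine ⟨⟨n0, List.mem_cons_of_mem _ hn0, hpn0⟩, ?_⟩
      intro q hq hpq
      rcases List.mem_cons.mp hq with rfl | hq'
      · exact absurd hpq hp
      · exact hmin q hq' hpq

theorem pvOuterA_none_iff (pred : String → String → Bool) (cands : List String) (en : List (Int × String)) :
    pvOuterA pred cands en = none ↔ ∀ cand ∈ cands, ∀ q ∈ en, pred q.2 cand = false := by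
  induction cands with
  | nil => simp [pvOuterA]
  | cons c cs ih =>
    rw [pvOuterA]
    cases h : pvInnerA pred c en with
    | some j =>
      simp only []
      constructor
      · intro hc; cases hc
      · intro hall
        have : pvInnerA pred c en = none := (pvInnerA_none_iff _ _ _).mpr (hall c (by simp))
        rw [h] at this; cases this
    | none =>
      simp only []
      rw [ih]
      constructor
      · intro hall cand hc q hq
        rcases List.mem_cons.mp hc with rfl | hc'
        · exact (pvInnerA_none_iff _ _ _).mp h q hq
        · exact hall cand hc' q hq
      · intro hall cand hc q hq
        exact hall cand (List.mem_cons_of_mem _ hc) q hq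

theorem pvOuterA_min (pred : String → String → Bool) (cands : List String) (en : List (Int × String))
    (hen : en.Pairwise (fun p q => p.1 < q.1)) : ∀ (s : Int) (ci i : Int) (cand name : String),
    (ci, cand) ∈ PySem.List.enumerate cands s → (i, name) ∈ en → pred name cand = true →
    (∀ p ∈ PySem.List.enumerate cands s, ∀ q ∈ en, pred q.2 p.2 = true →
      (ci < p.1 ∨ (ci = p.1 ∧ i ≤ q.1))) →
    pvOuterA pred cands en = some i := by
  induction cands with
  | nil => intro s ci i cand name hc; simp [PySem.List.enumerate] at hc
  | cons c0 cs ih =>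
    intro s ci i cand name hc hn hp hmin
    rw [PySem.List.enumerate_cons] at hc hmin
    have hs_le : s ≤ ci := by
      rcases List.mem_cons.mp hc with h | h
      · cases h; omega
      · rw [PySem.List.mem_enumerate_iff] at h
        obtain ⟨k, _, hk⟩ := h
        have : ci = s + 1 + k := congrArg Prod.fst hk
        omega
    rw [pvOuterA]
    cases h0 : pvInnerA pred c0 en with
    | some j =>
      simp only []
      obtain ⟨⟨n0, hn0, hpn0⟩, hjmin⟩ := pvInnerA_some pred c0 en hen j h0
      have hcase := hmin (s, c0) (by simp) (j, n0) hn0 hpn0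
      simp only [] at hcase
      have hci : ci = s := by omega
      have hcand : cand = c0 := by
        rcases List.mem_cons.mp hc with h | h
        · cases h; rfl
        · rw [PySem.List.mem_enumerate_iff] at h
          obtain ⟨k, _, hk⟩ := h
          have : ci = s + 1 + k := congrArg Prod.fst hk
          omega
      subst hcand
      have h1 : i ≤ j := by omega
      have h2 : j ≤ i := hjmin (i, name) hn hp
      have : j = i := by omega
      rw [this]
    | none =>
      simp only []
      have hnone := (pvInnerA_none_iff pred c0 en).mp h0
      have hc' : (ci, cand) ∈ PySem.List.enumerate cs (s + 1) := by
        rcases List.mem_cons.mp hc with h | h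
        · cases h
          exact absurd hp (by rw [hnone (i, name) hn]; simp)
        · exact h
      exact ih (s + 1) ci i cand name hc' hn hp
        (fun p hps q hq => hmin p (List.mem_cons_of_mem _ hps) q hq)

theorem pvTier_eq_one_iff (name cand : String) : pvTier name cand = some 1 ↔ (name == cand) = true := by
  unfold pvTier
  split_ifs with h1 h2 h3 <;> simp [h1]

theorem pvTier_pred2_iff (name cand : String) :
    (PySem.Str.startswith name cand || PySem.Str.endswith name cand) = true ↔
    (pvTier name cand = some 1 ∨ pvTier name cand = some 2) := by
  unfold pvTier
  split_ifs with h1 h2 h3 <;> simp_all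
  · subst h1
    exact Or.inl ((PySem.Chars.startswith_iff _ _).mpr (List.prefix_refl _))

theorem pvTier_pred3_iff (name cand : String) :
    PySem.Str.isIn cand name = true ↔ ∃ t, pvTier name cand = some t := by
  unfold pvTier
  split_ifs with h1 h2 h3 <;> simp_all
  · subst h1
    exact (PySem.Chars.isIn_iff_infix _ _).mpr (List.infix_refl _)
  · rw [PySem.Chars.isIn_iff_infix]
    rcases h2 with h | h
    · exact ((PySem.Chars.startswith_iff _ _).mp h).isInfix
    · exact ((PySem.Chars.endswith_iff _ _).mp h).isInfix

theorem pvTrip_mem_iff (cands lowered : List String) (k : Int × Int × Int) :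
    k ∈ pvTrip cands lowered ↔ ∃ p ∈ PySem.List.enumerate cands 0, ∃ q ∈ PySem.List.enumerate lowered 0,
      pvTier q.2 p.2 = some k.1 ∧ k.2.1 = p.1 ∧ k.2.2 = q.1 := by
  simp only [pvTrip, List.mem_flatMap, List.mem_filterMap, Option.map_eq_some_iff]
  constructor
  · rintro ⟨p, hp, q, hq, t, ht, rfl⟩
    exact ⟨p, hp, q, hq, ht, rfl, rfl⟩
  · rintro ⟨p, hp, q, hq, ht, h1, h2⟩
    refine ⟨p, hp, q, hq, k.1, ht, ?_⟩
    obtain ⟨a, b, c⟩ := k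
    simp_all


theorem pvFoldl_upd_none_iff (L : List (Int × Int × Int)) :
    L.foldl pvUpd none = none ↔ L = [] := by
  cases L with
  | nil => simp
  | cons b L =>
    obtain ⟨m, hm, _, _⟩ := pvFoldl_upd_some L b
    constructor
    · intro h
      have : List.foldl pvUpd (some b) L = none := h
      rw [hm] at this; cases this
    · intro h; cases h

theorem pvCore (cands lowered : List String) :
    (match pvOuterA (fun name cand => name == cand) cands (PySem.List.enumerate lowered 0) with
     | some i => some i
     | none =>
       match pvOuterA (fun name cand => PySem.Str.startswith name cand || PySem.Str.endswith name cand) cands (PySem.List.enumerate lowered 0) with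
       | some i => some i
       | none =>
         match pvOuterA (fun name cand => PySem.Str.isIn cand name) cands (PySem.List.enumerate lowered 0) with
         | some i => some i
         | none => none)
    = ((pvTrip cands lowered).foldl pvUpd none).map (fun b => b.2.2) := by
  have hen : (PySem.List.enumerate lowered 0).Pairwise (fun p q => p.1 < q.1) :=
    PySem.List.pairwise_lt_enumerate lowered 0
  -- membership of a candidate yields an enumerated pair
  have hmemc : ∀ cand' ∈ cands, ∃ p' ∈ PySem.List.enumerate cands 0, p'.2 = cand' := by
    intro cand' hc
    have : cand' ∈ (PySem.List.enumerate cands 0).map (fun p => p.2) := by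
      rw [PySem.List.map_snd_enumerate]; exact hc
    obtain ⟨p', hp', he⟩ := List.mem_map.mp this
    exact ⟨p', hp', he⟩
  cases hfold : (pvTrip cands lowered).foldl pvUpd none with
  | none =>
    -- no matches at all
    have htrip : pvTrip cands lowered = [] := (pvFoldl_upd_none_iff _).mp hfold
    have hno : ∀ p ∈ PySem.List.enumerate cands 0, ∀ q ∈ PySem.List.enumerate lowered 0,
        pvTier q.2 p.2 = none := by
      intro p hp q hq
      cases ht : pvTier q.2 p.2 with
      | none => rfl
      | some t =>
        have : (t, p.1, q.1) ∈ pvTrip cands lowered :=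
          (pvTrip_mem_iff _ _ _).mpr ⟨p, hp, q, hq, ht, rfl, rfl⟩
        rw [htrip] at this; cases this
    have hno' : ∀ cand' ∈ cands, ∀ q ∈ PySem.List.enumerate lowered 0,
        pvTier q.2 cand' = none := by
      intro cand' hc q hq
      obtain ⟨p', hp', rfl⟩ := hmemc cand' hc
      exact hno p' hp' q hq
    have h1 : pvOuterA (fun name cand => name == cand) cands (PySem.List.enumerate lowered 0) = none := by
      rw [pvOuterA_none_iff]
      intro cand hc q hq
      rw [Bool.eq_false_iff]; intro hb
      have := (pvTier_eq_one_iff q.2 cand).mpr hb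
      rw [hno' cand hc q hq] at this; cases this
    have h2 : pvOuterA (fun name cand => PySem.Str.startswith name cand || PySem.Str.endswith name cand) cands (PySem.List.enumerate lowered 0) = none := by
      rw [pvOuterA_none_iff]
      intro cand hc q hq
      rw [Bool.eq_false_iff]; intro hb
      rcases (pvTier_pred2_iff q.2 cand).mp hb with h | h <;>
        · rw [hno' cand hc q hq] at h; cases h
    have h3 : pvOuterA (fun name cand => PySem.Str.isIn cand name) cands (PySem.List.enumerate lowered 0) = none := by
      rw [pvOuterA_none_iff]
      intro cand hc q hq
      rw [Bool.eq_false_iff]; intro hb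
      obtain ⟨t, ht⟩ := (pvTier_pred3_iff q.2 cand).mp hb
      rw [hno' cand hc q hq] at ht; cases ht
    rw [h1, h2, h3]
    rfl
  | some m =>
    obtain ⟨hmem, hmin⟩ := pvFoldl_upd_char _ m hfold
    obtain ⟨p, hp, q, hq, ht, he1, he2⟩ := (pvTrip_mem_iff _ _ _).mp hmem
    -- minimality phrased on triples
    have hminT : ∀ p' ∈ PySem.List.enumerate cands 0, ∀ q' ∈ PySem.List.enumerate lowered 0,
        ∀ t', pvTier q'.2 p'.2 = some t' → pvKeyLt (t', p'.1, q'.1) m = false := by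
      intro p' hp' q' hq' t' ht'
      exact hmin _ ((pvTrip_mem_iff _ _ _).mpr ⟨p', hp', q', hq', ht', rfl, rfl⟩)
    obtain ⟨pi, pc⟩ := p
    obtain ⟨qi, qn⟩ := q
    simp only [] at ht he1 he2
    rcases pvTier_range ht with h1 | h2 | h3
    · -- exact match tier
      have hpred : (qn == pc) = true := (pvTier_eq_one_iff qn pc).mp (by rw [ht, h1])
      have hpass1 := pvOuterA_min (fun name cand => name == cand) cands
        (PySem.List.enumerate lowered 0) hen 0 pi qi pc qn hp hq hpred ?_
      · rw [hpass1]
        simp [he2]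
      · intro p' hp' q' hq' hb
        have ht' : pvTier q'.2 p'.2 = some 1 := (pvTier_eq_one_iff _ _).mpr hb
        have hlt := hminT p' hp' q' hq' 1 ht'
        rw [Bool.eq_false_iff] at hlt
        simp only [ne_eq, pvKeyLt_iff] at hlt
        omega
    · -- prefix/suffix tier
      have hpass1 : pvOuterA (fun name cand => name == cand) cands (PySem.List.enumerate lowered 0) = none := by
        rw [pvOuterA_none_iff]
        intro cand hc q' hq'
        rw [Bool.eq_false_iff]; intro hb
        obtain ⟨p', hp', rfl⟩ := hmemc cand hc
        have hlt := hminT p' hp' q' hq' 1 ((pvTier_eq_one_iff _ _).mpr hb)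
        rw [Bool.eq_false_iff] at hlt
        simp only [ne_eq, pvKeyLt_iff] at hlt
        exact hlt (by omega)
      have hpred : (PySem.Str.startswith qn pc || PySem.Str.endswith qn pc) = true :=
        (pvTier_pred2_iff qn pc).mpr (Or.inr (by rw [ht, h2]))
      have hpass2 := pvOuterA_min (fun name cand => PySem.Str.startswith name cand || PySem.Str.endswith name cand)
        cands (PySem.List.enumerate lowered 0) hen 0 pi qi pc qn hp hq hpred ?_
      · rw [hpass1, hpass2]
        simp [he2]
      · intro p' hp' q' hq' hb
        rcases (pvTier_pred2_iff q'.2 p'.2).mp hb with ht' | ht'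
        · have hlt := hminT p' hp' q' hq' 1 ht'
          rw [Bool.eq_false_iff] at hlt
          simp only [ne_eq, pvKeyLt_iff] at hlt
          exact (hlt (by omega)).elim
        · have hlt := hminT p' hp' q' hq' 2 ht'
          rw [Bool.eq_false_iff] at hlt
          simp only [ne_eq, pvKeyLt_iff] at hlt
          omega
    · -- contains tier
      have hpass1 : pvOuterA (fun name cand => name == cand) cands (PySem.List.enumerate lowered 0) = none := by
        rw [pvOuterA_none_iff]
        intro cand hc q' hq'
        rw [Bool.eq_false_iff]; intro hb
        obtain ⟨p', hp', rfl⟩ := hmemc cand hc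
        have hlt := hminT p' hp' q' hq' 1 ((pvTier_eq_one_iff _ _).mpr hb)
        rw [Bool.eq_false_iff] at hlt
        simp only [ne_eq, pvKeyLt_iff] at hlt
        exact hlt (by omega)
      have hpass2 : pvOuterA (fun name cand => PySem.Str.startswith name cand || PySem.Str.endswith name cand)
          cands (PySem.List.enumerate lowered 0) = none := by
        rw [pvOuterA_none_iff]
        intro cand hc q' hq'
        rw [Bool.eq_false_iff]; intro hb
        obtain ⟨p', hp', rfl⟩ := hmemc cand hc
        rcases (pvTier_pred2_iff q'.2 p'.2).mp hb with ht' | ht' <;>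
        · first
          | (have hlt := hminT p' hp' q' hq' 1 ht'
             rw [Bool.eq_false_iff] at hlt
             simp only [ne_eq, pvKeyLt_iff] at hlt
             exact hlt (by omega))
          | (have hlt := hminT p' hp' q' hq' 2 ht'
             rw [Bool.eq_false_iff] at hlt
             simp only [ne_eq, pvKeyLt_iff] at hlt
             exact hlt (by omega))
      have hpred : PySem.Str.isIn pc qn = true :=
        (pvTier_pred3_iff qn pc).mpr ⟨m.1, ht⟩
      have hpass3 := pvOuterA_min (fun name cand => PySem.Str.isIn cand name)
        cands (PySem.List.enumerate lowered 0) hen 0 pi qi pc qn hp hq hpred ?_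
      · rw [hpass1, hpass2, hpass3]
        simp [he2]
      · intro p' hp' q' hq' hb
        obtain ⟨t', ht'⟩ := (pvTier_pred3_iff q'.2 p'.2).mp hb
        have hlt := hminT p' hp' q' hq' t' ht'
        rw [Bool.eq_false_iff] at hlt
        simp only [ne_eq, pvKeyLt_iff] at hlt
        have htr := pvTier_range ht'
        omega

-- ===== VERDICT (by name: the statement is the Claim_ definition above) =====
theorem pick_model_index_py_spec : Claim_equal_pick_model_index_py := by
  intro model_names raw_candidates _
  unfold Spec_pick_model_index_py pick_model_index_py pick_model_index_py_alt
  by_cases h1 : model_names.isEmpty <;>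
    by_cases h2 : ((raw_candidates.filter (fun c => !(PySem.Str.strip c == ""))).map PySem.Str.lower).isEmpty <;>
      simp only [h1, h2, Bool.or_true, if_true] <;>
      try rfl
  rw [pvOuterB_eq_foldl _ _ _ (PySem.List.pairwise_lt_enumerate _ 0) (by intro b h; cases h)]
  rw [pvB_fold_eq]
  exact pvCore _ _
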